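-- pv_equiv track=rewrite | github.com/jpbruneton/QDSR | core/Simplification_Rules.py | simplify_aa_op
-- ===== SOURCE A (Python) =====
-- def simplify_aa_op(pf):
--     if len(pf) <=2:
--         return pf
--     newpf = []
--     i = 0
--     while i <= len(pf) - 3:
--         if pf[i] == 'A' and pf[i + 1] == 'A' and pf[i + 2] in ['+', '-', '*', '/', '**']:
--             newpf.append('A')
--             i += 3
--             break
--         else:
--             newpf.append(pf[i])
--             i += 1
--     newpf += pf[i:]
--     return newpf
-- ===== SOURCE B (Python) =====
-- def simplify_aa_op(pf):
--     for i in range(len(pf) - 2):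
--         if pf[i] == 'A' and pf[i + 1] == 'A' and pf[i + 2] in ('+', '-', '*', '/', '**'):
--             return pf[:i] + ['A'] + pf[i + 3:]
--     return pf[:]
-- ===== Notes on version B (the rewrite author's own statement) =====
-- stated objective: simpler
-- what changed: B finds the split index with a single for/range scan and returns it via slicing (pf[:i] + ['A'] + pf[i+3:]), instead of A's while-loop that builds a newpf accumulator element by element with a break and a tail concatenation.
import Mathlib
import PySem

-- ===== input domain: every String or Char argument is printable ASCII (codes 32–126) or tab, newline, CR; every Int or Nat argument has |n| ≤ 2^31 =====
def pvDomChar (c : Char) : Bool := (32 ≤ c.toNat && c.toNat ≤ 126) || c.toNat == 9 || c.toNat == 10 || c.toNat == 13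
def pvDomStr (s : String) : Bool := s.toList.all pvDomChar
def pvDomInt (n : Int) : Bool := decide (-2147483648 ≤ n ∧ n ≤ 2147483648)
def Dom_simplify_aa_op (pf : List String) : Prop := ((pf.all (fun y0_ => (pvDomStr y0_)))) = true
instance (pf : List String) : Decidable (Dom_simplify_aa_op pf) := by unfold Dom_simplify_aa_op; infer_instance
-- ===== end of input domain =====

-- B replaces A's accumulator-building while loop with an index-finding scan plus slicing (objective: simpler).


-- the '... and pf[i+2] in [...]' operator test, shared by both ports
def isAAop (pf : List String) (i : Nat) : Bool :=
  pf.getD i "" == "A" && pf.getD (i+1) "" == "A" &&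
    (pf.getD (i+2) "" ∈ ["+", "-", "*", "/", "**"])

-- ===== PORT A =====
-- A's while loop: i and the newpf accumulator; break replaced by returning directly
def aLoop (pf : List String) (i : Nat) (newpf : List String) : List String :=
  if _h : i + 3 ≤ pf.length then
    if isAAop pf i then
      -- append 'A', i += 3, break; then newpf += pf[i:]
      (newpf ++ ["A"]) ++ pf.drop (i + 3)
    else
      aLoop pf (i + 1) (newpf ++ [pf.getD i ""])
  else
    newpf ++ pf.drop i
termination_by pf.length - i

def simplify_aa_op (pf : List String) : List String :=
  if pf.length ≤ 2 then pf
  else aLoop pf 0 []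

-- ===== PORT B =====
-- B's for-loop over range(len(pf)-2) returning the first matching index
def bFind (pf : List String) (i : Nat) : Option Nat :=
  if _h : i + 3 ≤ pf.length then
    if isAAop pf i then some i
    else bFind pf (i + 1)
  else
    none
termination_by pf.length - i

def simplify_aa_op_alt (pf : List String) : List String :=
  match bFind pf 0 with
  | some i => pf.take i ++ ["A"] ++ pf.drop (i + 3)
  | none => pf

-- ===== PRECONDITION & SPEC =====
def Spec_simplify_aa_op (pf : List String) (out : List String) : Prop := out = simplify_aa_op_alt pf
instance (pf : List String) (out : List String) : Decidable (Spec_simplify_aa_op pf out) := by unfold Spec_simplify_aa_op; infer_instance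

-- ===== CLAIM (what is proved, stated in full; the proofs are below) =====
def Claim_equal_simplify_aa_op : Prop := ∀ (pf : List String), Dom_simplify_aa_op pf → Spec_simplify_aa_op pf (simplify_aa_op pf)

-- ===== LEMMAS AND PROOFS =====

theorem aLoop_eq_find (pf : List String) (i : Nat) :
    aLoop pf i (pf.take i) =
      match bFind pf i with
      | some j => pf.take j ++ ["A"] ++ pf.drop (j + 3)
      | none => pf := by
  unfold aLoop bFind
  split
  · split
    · simp [List.append_assoc]
    · have hlt : i < pf.length := by omega
      have : pf.take i ++ [pf.getD i ""] = pf.take (i + 1) := by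
        rw [List.getD_eq_getElem pf _ hlt, List.take_succ, List.getElem?_eq_getElem hlt]
        simp
      rw [this]
      exact aLoop_eq_find pf (i + 1)
  · simp
termination_by pf.length - i

theorem simplify_aa_op_spec : Claim_equal_simplify_aa_op := by
  intro pf _
  show simplify_aa_op pf = simplify_aa_op_alt pf
  unfold simplify_aa_op simplify_aa_op_alt
  split
  · -- len ≤ 2: bFind fails immediately
    rename_i h
    rw [bFind]
    simp only [dif_neg (by omega : ¬ 0 + 3 ≤ pf.length)]
  · have := aLoop_eq_find pf 0
    simpa using this
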